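-- pv_equiv track=rewrite | github.com/nicholasturner1/Synaptor | synaptor/proc/edge/merge/misc.py | update_id_map
-- ===== SOURCE A (Python) =====
-- def update_id_map(id_map, next_map, reused_ids=False):
--
--     # need to keep track of which keys are accounted
--     # for within the current id_map
--     new_keys = set(next_map.keys())
--
--     for (k, v) in id_map.items():
--         id_map[k] = next_map.get(v, v)
--         new_keys.discard(v)
--
--     # make a new mapping for each new key
--     if not reused_ids:
--         for k in new_keys:
--             id_map[k] = next_map[k]
--
--     return id_map
-- ===== SOURCE B (Python) =====
-- def update_id_map(id_map, next_map, reused_ids=False):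
--     # invert id_map once: value -> list of keys currently mapping to it
--     inv = {}
--     for k, v in id_map.items():
--         inv.setdefault(v, []).append(k)
--
--     # single pass over next_map: push each new value onto the keys of its
--     # preimage; keys with no preimage are brand-new mappings (deferred so
--     # they are added after all remaps)
--     pending = []
--     for nk, nv in next_map.items():
--         if nk in inv:
--             for k in inv[nk]:
--                 id_map[k] = nv
--         elif not reused_ids:
--             pending.append((nk, nv))
--
--     for nk, nv in pending:
--         id_map[nk] = nv
--
--     return id_map
-- ===== Notes on version B (the rewrite author's own statement) =====
-- stated objective: alternative
-- what changed: A loops over id_map doing a next_map lookup and a set.discard per entry, then iterates the surviving key set; B builds an inverse index (value -> preimage keys) of id_map once and makes a single pass over next_map, pushing each new value onto its preimage keys and collecting keys with no preimage as deferred new entries.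
import Mathlib
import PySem

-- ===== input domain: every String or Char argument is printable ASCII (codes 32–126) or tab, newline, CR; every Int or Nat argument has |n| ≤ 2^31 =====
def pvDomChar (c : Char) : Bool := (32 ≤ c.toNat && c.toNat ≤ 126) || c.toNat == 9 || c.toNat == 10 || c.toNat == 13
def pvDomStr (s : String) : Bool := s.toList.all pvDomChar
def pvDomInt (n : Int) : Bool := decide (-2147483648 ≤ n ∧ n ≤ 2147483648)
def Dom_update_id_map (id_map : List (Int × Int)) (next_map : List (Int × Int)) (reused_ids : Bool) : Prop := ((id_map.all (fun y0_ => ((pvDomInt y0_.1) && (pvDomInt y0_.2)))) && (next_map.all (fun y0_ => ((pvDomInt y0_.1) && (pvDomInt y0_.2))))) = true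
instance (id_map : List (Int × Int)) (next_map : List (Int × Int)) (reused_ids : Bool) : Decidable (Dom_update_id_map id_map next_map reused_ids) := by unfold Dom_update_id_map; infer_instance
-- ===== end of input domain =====

-- B inverts the mapping once (value -> preimage keys) and then makes a SINGLE pass over
-- next_map, pushing each new value onto the keys of its preimage and collecting keys with
-- no preimage as deferred new entries — instead of A's pass over id_map with per-entry
-- next_map lookups and per-entry set-discard bookkeeping (objective: alternative).
-- Both Pythons mutate `id_map` in place and return it; B performs the same in-place mutation.

-- ===== PORT A =====
def update_id_map (id_map : List (Int × Int)) (next_map : List (Int × Int)) (reused_ids : Bool) : List (Int × Int) :=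
  let d0 : PySem.Dict Int Int := PySem.Dict.ofList id_map
  let nd : PySem.Dict Int Int := PySem.Dict.ofList next_map
  -- new_keys = set(next_map.keys())
  let new_keys : PySem.Set Int := PySem.Set.ofList nd.keys
  -- for (k, v) in id_map.items(): id_map[k] = next_map.get(v, v); new_keys.discard(v)
  -- (each key is reassigned exactly at its own iteration, so every v read is original)
  let st := d0.items.foldl
      (fun (st : PySem.Dict Int Int × PySem.Set Int) kv =>
        (st.1.insert kv.1 (nd.getD kv.2 kv.2), st.2.discard kv.2))
      (d0, new_keys)
  -- if not reused_ids: for k in new_keys: id_map[k] = next_map[k]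
  -- (k ∈ new_keys ⊆ next_map's keys, so next_map[k] never raises; getD's default is unreachable)
  let d := if reused_ids then st.1
           else st.2.foldl (fun d k => d.insert k (nd.getD k 0)) st.1
  d.items

-- ===== PORT B =====
def update_id_map_alt (id_map : List (Int × Int)) (next_map : List (Int × Int)) (reused_ids : Bool) : List (Int × Int) :=
  let d0 : PySem.Dict Int Int := PySem.Dict.ofList id_map
  let nd : PySem.Dict Int Int := PySem.Dict.ofList next_map
  -- inv = {}; for k, v in id_map.items(): inv.setdefault(v, []).append(k)
  let inv : PySem.Dict Int (List Int) :=
    d0.items.foldl (fun inv kv => inv.modify kv.2 [] (· ++ [kv.1])) PySem.Dict.empty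
  -- pending = []
  -- for nk, nv in next_map.items():
  --   if nk in inv: for k in inv[nk]: id_map[k] = nv
  --   elif not reused_ids: pending.append((nk, nv))
  let st := nd.items.foldl
      (fun (st : PySem.Dict Int Int × List (Int × Int)) nw =>
        if inv.contains nw.1 then
          ((inv.getD nw.1 []).foldl (fun d k => d.insert k nw.2) st.1, st.2)
        else if reused_ids then st
        else (st.1, st.2 ++ [nw]))
      (d0, [])
  -- for nk, nv in pending: id_map[nk] = nv
  let d := st.2.foldl (fun d nw => d.insert nw.1 nw.2) st.1
  d.items

-- ===== PRECONDITION & SPEC =====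
def Spec_update_id_map (id_map : List (Int × Int)) (next_map : List (Int × Int)) (reused_ids : Bool) (out : List (Int × Int)) : Prop := out = update_id_map_alt id_map next_map reused_ids
instance (id_map : List (Int × Int)) (next_map : List (Int × Int)) (reused_ids : Bool) (out : List (Int × Int)) : Decidable (Spec_update_id_map id_map next_map reused_ids out) := by unfold Spec_update_id_map; infer_instance

-- ===== CLAIM (what is proved, stated in full; the proofs are below) =====
def Claim_equal_update_id_map : Prop := ∀ (id_map : List (Int × Int)) (next_map : List (Int × Int)) (reused_ids : Bool), Dom_update_id_map id_map next_map reused_ids → Spec_update_id_map id_map next_map reused_ids (update_id_map id_map next_map reused_ids)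

-- ===== LEMMAS AND PROOFS =====

-- A's discard loop over a list computes the filter by non-membership in that list.
theorem foldl_discard_eq_filter (l : List Int) (s : PySem.Set Int) :
    l.foldl PySem.Set.discard s = s.filter (fun x => decide (x ∉ l)) := by
  induction l generalizing s with
  | nil => simp
  | cons a t ih =>
    simp only [List.foldl_cons, ih, PySem.Set.discard, List.filter_filter]
    apply List.filter_congr
    intro x _
    by_cases hxa : x = a <;> by_cases hxt : x ∈ t <;> simp [hxa, hxt]

-- In a list with unique keys, filtering by the key of a member leaves exactly that member.
theorem filter_key_of_nodup (L : List (Int × Int)) (p : Int × Int) (hp : p ∈ L)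
    (hnd : (L.map Prod.fst).Nodup) : L.filter (fun q => q.1 == p.1) = [p] := by
  induction L with
  | nil => cases hp
  | cons a t ih =>
    simp only [List.map_cons, List.nodup_cons] at hnd
    rcases List.mem_cons.mp hp with h | h
    · subst h
      have ht : t.filter (fun q => q.1 == p.1) = [] := by
        refine List.filter_eq_nil_iff.mpr ?_
        intro q hq
        have hm : q.1 ∈ t.map Prod.fst := List.mem_map_of_mem hq
        simp only [beq_iff_eq]
        intro hqe; exact hnd.1 (hqe ▸ hm)
      simp [ht]
    · have hne : (a.1 == p.1) = false := by
        have hm : p.1 ∈ t.map Prod.fst := List.mem_map_of_mem h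
        simp only [beq_eq_false_iff_ne]
        intro he; exact hnd.1 (he ▸ hm)
      simp [hne, ih h hnd.2]

-- A fold of inserts whose keys are all already present acts on the items list by maps.
theorem foldl_insert_items (l : List (Int × Int)) (d : PySem.Dict Int Int)
    (h : ∀ kv ∈ l, d.contains kv.1 = true) :
    (l.foldl (fun d kv => d.insert kv.1 kv.2) d).items
      = l.foldl (fun its kv => its.map (fun p => if p.1 == kv.1 then (kv.1, kv.2) else p)) d.items := by
  induction l generalizing d with
  | nil => rfl
  | cons a t ih =>
    simp only [List.foldl_cons]
    rw [ih (d.insert a.1 a.2)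
        (fun kv hkv => by
          rw [PySem.Dict.contains_insert]
          simp [h kv (List.mem_cons_of_mem a hkv)]),
        PySem.Dict.items_insert_of_contains _ _ (h a (List.mem_cons_self ..))]

-- Applying a list of keyed updates to an items list: per entry, the last matching update wins.
theorem foldl_map_upd (u : List (Int × Int)) (M : List (Int × Int)) :
    u.foldl (fun its kv => its.map (fun p => if p.1 == kv.1 then (kv.1, kv.2) else p)) M
      = M.map (fun p => (p.1, (u.filter (fun q => q.1 == p.1)).foldl (fun _ q => q.2) p.2)) := by
  induction u generalizing M with
  | nil => simp
  | cons a u' ih =>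
    simp only [List.foldl_cons]
    rw [ih, List.map_map]
    apply List.map_congr_left
    intro p _
    simp only [Function.comp_apply]
    by_cases h : p.1 = a.1
    · simp [h]
    · have h' : (a.1 == p.1) = false := by
        simp only [beq_eq_false_iff_ne]; exact fun he => h he.symm
      simp [h, h']

-- A fold of inserts over a flatMap is the nested fold.
theorem foldl_flatMap_dict (N : List (Int × Int)) (F : Int × Int → List (Int × Int))
    (d : PySem.Dict Int Int) :
    (N.flatMap F).foldl (fun d kv => d.insert kv.1 kv.2) d
      = N.foldl (fun d nw => (F nw).foldl (fun d kv => d.insert kv.1 kv.2) d) d := by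
  induction N generalizing d with
  | nil => rfl
  | cons a t ih => simp only [List.flatMap_cons, List.foldl_append, List.foldl_cons, ih]

-- flatMap of a guarded singleton is filter-then-map.
theorem flatMap_ite_singleton (N : List (Int × Int)) (pred : Int × Int → Bool)
    (g : Int × Int → Int × Int) :
    N.flatMap (fun nw => if pred nw then [g nw] else []) = (N.filter pred).map g := by
  induction N with
  | nil => rfl
  | cons a t ih =>
    by_cases h : pred a = true <;> simp [h, ih]

-- A's remap loop: every key stays in place, its value becomes next_map.get(v, v).
theorem remapA_eq (d0 nd : PySem.Dict Int Int) (hK : (d0.items.map Prod.fst).Nodup) :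
    (d0.items.foldl (fun d kv => d.insert kv.1 (nd.getD kv.2 kv.2)) d0).items
      = d0.items.map (fun p => (p.1, nd.getD p.2 p.2)) := by
  have h1 : d0.items.foldl (fun d kv => d.insert kv.1 (nd.getD kv.2 kv.2)) d0
      = (d0.items.map (fun kv => (kv.1, nd.getD kv.2 kv.2))).foldl (fun d kv => d.insert kv.1 kv.2) d0 := by
    rw [List.foldl_map]
  rw [h1, foldl_insert_items, foldl_map_upd]
  · apply List.map_congr_left
    intro p hp
    have hcomp : (d0.items.map (fun kv => (kv.1, nd.getD kv.2 kv.2))).filter (fun q => q.1 == p.1)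
        = (d0.items.filter (fun q => q.1 == p.1)).map (fun kv => (kv.1, nd.getD kv.2 kv.2)) := by
      rw [List.filter_map]; rfl
    rw [hcomp, filter_key_of_nodup d0.items p hp hK]
    rfl
  · intro kv hkv
    rcases List.mem_map.mp hkv with ⟨q, hq, rfl⟩
    rw [PySem.Dict.contains_eq_decide_mem_keys]
    simp only [PySem.Dict.keys, decide_eq_true_eq]
    exact List.mem_map_of_mem hq
-- B's inverse-index pass: same result, computed per next_map entry over its preimage.
theorem remapB_eq (d0 nd : PySem.Dict Int Int) (inv : PySem.Dict Int (List Int))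
    (hK : (d0.items.map Prod.fst).Nodup) (hN : (nd.items.map Prod.fst).Nodup)
    (hcont : ∀ n, inv.contains n = decide (n ∈ d0.items.map Prod.snd))
    (hfib : ∀ n, inv.getD n [] = (d0.items.filter (fun q => q.2 == n)).map Prod.fst) :
    (nd.items.foldl (fun d nw =>
        if inv.contains nw.1 then (inv.getD nw.1 []).foldl (fun d k => d.insert k nw.2) d else d) d0).items
      = d0.items.map (fun p => (p.1, nd.getD p.2 p.2)) := by
  have hstep : (nd.items.foldl (fun d nw =>
        if inv.contains nw.1 then (inv.getD nw.1 []).foldl (fun d k => d.insert k nw.2) d else d) d0)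
      = (nd.items.flatMap (fun nw =>
          if inv.contains nw.1 then (inv.getD nw.1 []).map (fun k => (k, nw.2)) else [])).foldl
          (fun d kv => d.insert kv.1 kv.2) d0 := by
    rw [foldl_flatMap_dict]
    apply PySem.List.foldl_congr_mem
    intro d nw _
    by_cases h : inv.contains nw.1 = true
    · simp only [h, if_pos]
      rw [List.foldl_map]
    · simp [h]
  rw [hstep, foldl_insert_items, foldl_map_upd]
  · apply List.map_congr_left
    intro p hp
    have hpv : p.2 ∈ d0.items.map Prod.snd := List.mem_map_of_mem hp
    have hfilter : (nd.items.flatMap (fun nw =>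
          if inv.contains nw.1 then (inv.getD nw.1 []).map (fun k => (k, nw.2)) else [])).filter
            (fun q => q.1 == p.1)
        = (nd.items.filter (fun nw => nw.1 == p.2)).map (fun nw => (p.1, nw.2)) := by
      rw [List.filter_flatMap, ← flatMap_ite_singleton nd.items (fun nw => nw.1 == p.2) (fun nw => (p.1, nw.2))]
      apply List.flatMap_congr
      intro nw _
      by_cases hc : inv.contains nw.1 = true
      · simp only [hc, if_pos]
        rw [hfib, List.map_map]
        have hcm : ((d0.items.filter (fun q => q.2 == nw.1)).map ((fun k => (k, nw.2)) ∘ Prod.fst)).filter (fun q => q.1 == p.1)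
            = ((d0.items.filter (fun q => q.2 == nw.1)).filter (fun q => q.1 == p.1)).map ((fun k => (k, nw.2)) ∘ Prod.fst) := by
          rw [List.filter_map]; rfl
        rw [hcm, List.filter_filter, show (fun q : Int × Int => (q.1 == p.1) && (q.2 == nw.1))
              = (fun q : Int × Int => (q.2 == nw.1) && (q.1 == p.1)) from by funext q; exact Bool.and_comm .. ,
            ← List.filter_filter, filter_key_of_nodup d0.items p hp hK]
        by_cases hv : nw.1 = p.2
        · simp [hv, Function.comp]
        · have : (p.2 == nw.1) = false := by simp only [beq_eq_false_iff_ne]; exact fun he => hv he.symm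
          simp [this, hv]
      · have hnv : (nw.1 == p.2) = false := by
          simp only [beq_eq_false_iff_ne]
          intro he
          rw [hcont nw.1, he] at hc
          simp [hpv] at hc
        simp [hc, hnv]
    rw [hfilter]
    cases hg : nd.get? p.2 with
    | some w =>
      have hmem : (p.2, w) ∈ nd.items := PySem.Dict.mem_items_of_get?_eq_some _ hg
      have hf2 : nd.items.filter (fun nw => nw.1 == p.2) = [(p.2, w)] :=
        filter_key_of_nodup nd.items (p.2, w) hmem hN
      rw [hf2, PySem.Dict.getD_of_get?_eq_some _ _ hg]
      rfl
    | none =>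
      have hf2 : nd.items.filter (fun nw => nw.1 == p.2) = [] := by
        refine List.filter_eq_nil_iff.mpr ?_
        intro q hq
        have hm : q.1 ∈ nd.keys := PySem.Dict.mem_keys_of_mem_items _ hq
        simp only [beq_iff_eq]
        intro he
        rw [he] at hm
        exact (PySem.Dict.get?_eq_none_iff_not_mem_keys _ _).mp hg hm
      rw [hf2, PySem.Dict.getD_of_get?_eq_none _ _ hg]
      rfl
  · intro kv hkv
    rcases List.mem_flatMap.mp hkv with ⟨nw, hnw, hkvF⟩
    by_cases hc : inv.contains nw.1 = true
    · simp only [hc, if_pos] at hkvF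
      rcases List.mem_map.mp hkvF with ⟨k, hk, rfl⟩
      rw [hfib] at hk
      rcases List.mem_map.mp hk with ⟨q, hq, rfl⟩
      rw [PySem.Dict.contains_eq_decide_mem_keys]
      simp only [PySem.Dict.keys, decide_eq_true_eq]
      exact List.mem_map_of_mem (List.mem_filter.mp hq).1
    · simp [hc] at hkvF

-- ===== VERDICT (by name: the statement is the Claim_ definition above) =====
theorem update_id_map_spec : Claim_equal_update_id_map := by
  intro id_map next_map reused_ids _
  unfold Spec_update_id_map update_id_map update_id_map_alt
  simp only
  set inv := (PySem.Dict.ofList id_map).items.foldl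
      (fun inv kv => inv.modify kv.2 [] (· ++ [kv.1])) PySem.Dict.empty with hinv
  have hK : ((PySem.Dict.ofList id_map).items.map Prod.fst).Nodup :=
    PySem.Dict.nodup_keys_ofList id_map
  have hN : ((PySem.Dict.ofList next_map).items.map Prod.fst).Nodup :=
    PySem.Dict.nodup_keys_ofList next_map
  have hkeysinv : inv.keys = PySem.Set.ofList ((PySem.Dict.ofList id_map).items.map Prod.snd) := by
    rw [hinv, PySem.Dict.keys_foldl_modify_key]
    rw [PySem.Dict.keys_empty, PySem.Set.update_nil_left]
  have hcont : ∀ n, inv.contains n = decide (n ∈ (PySem.Dict.ofList id_map).items.map Prod.snd) := by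
    intro n
    rw [PySem.Dict.contains_eq_decide_mem_keys, hkeysinv]
    simp [PySem.Set.mem_ofList]
  have hfib : ∀ n, inv.getD n []
      = ((PySem.Dict.ofList id_map).items.filter (fun q => q.2 == n)).map Prod.fst := by
    intro n
    have hsw : (PySem.Dict.ofList id_map).items.foldl
          (fun d kv => d.modify kv.2 [] (· ++ [kv.1])) PySem.Dict.empty
        = ((PySem.Dict.ofList id_map).items.map Prod.swap).foldl
          (fun d p => d.modify p.1 [] (· ++ [p.2])) PySem.Dict.empty := by
      rw [List.foldl_map]; simp
    rw [hinv, hsw, PySem.Dict.getD_foldl_modify_append]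
    rw [show ((PySem.Dict.ofList id_map).items.map Prod.swap).filter (fun p => p.1 == n)
          = ((PySem.Dict.ofList id_map).items.filter (fun q => q.2 == n)).map Prod.swap from by
        rw [List.filter_map]; rfl]
    simp [List.map_map, Function.comp_def]
  -- decompose A's pair fold into two independent folds
  rw [PySem.List.foldl_prod_mk
        (f := fun d (kv : Int × Int) => PySem.Dict.insert d kv.1
              ((PySem.Dict.ofList next_map).getD kv.2 kv.2))
        (g := fun s (kv : Int × Int) => PySem.Set.discard s kv.2)]
  -- decompose B's pair fold into two independent folds
  have hsplit : ∀ (N : List (Int × Int)) (d : PySem.Dict Int Int) (pl : List (Int × Int)),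
      List.foldl (fun (st : PySem.Dict Int Int × List (Int × Int)) (nw : Int × Int) =>
        if inv.contains nw.1 then
          ((inv.getD nw.1 []).foldl (fun d k => d.insert k nw.2) st.1, st.2)
        else if reused_ids then st else (st.1, st.2 ++ [nw])) (d, pl) N
      = (List.foldl (fun d nw => if inv.contains nw.1 then
            (inv.getD nw.1 []).foldl (fun d k => d.insert k nw.2) d else d) d N,
         List.foldl (fun p nw => if inv.contains nw.1 then p
            else if reused_ids then p else p ++ [nw]) pl N) := by
    intro N
    induction N with
    | nil => intro d pl; rfl
    | cons a t ih =>
      intro d pl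
      simp only [List.foldl_cons]
      by_cases h : inv.contains a.1 = true
      · simp only [h, if_pos]
        exact ih _ _
      · simp only [if_neg h]
        by_cases hr : reused_ids = true
        · rw [if_pos hr, if_pos hr]
          exact ih _ _
        · rw [if_neg hr, if_neg hr]
          exact ih _ _
  rw [hsplit]
  have hD01 : (PySem.Dict.ofList id_map).items.foldl
        (fun d kv => d.insert kv.1 ((PySem.Dict.ofList next_map).getD kv.2 kv.2))
        (PySem.Dict.ofList id_map)
      = (PySem.Dict.ofList next_map).items.foldl
        (fun d nw => if inv.contains nw.1 then
            (inv.getD nw.1 []).foldl (fun d k => d.insert k nw.2) d else d)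
        (PySem.Dict.ofList id_map) := by
    apply PySem.Dict.ext
    rw [remapA_eq _ _ hK,
        remapB_eq (PySem.Dict.ofList id_map) (PySem.Dict.ofList next_map) inv hK hN hcont hfib]
  cases reused_ids with
  | true =>
    simp only [ite_self, if_true, PySem.List.foldl_ignore, List.foldl_nil]
    exact congrArg PySem.Dict.items hD01
  | false =>
    simp only [Bool.false_eq_true, if_false]
    -- normalize A's discard fold to a filter of next_map's keys
    rw [show (PySem.Dict.ofList id_map).items.foldl
          (fun s (kv : Int × Int) => PySem.Set.discard s kv.2)
          (PySem.Set.ofList (PySem.Dict.ofList next_map).keys)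
        = ((PySem.Dict.ofList id_map).items.map Prod.snd).foldl PySem.Set.discard
          (PySem.Set.ofList (PySem.Dict.ofList next_map).keys) from by rw [List.foldl_map],
       foldl_discard_eq_filter,
       PySem.Set.ofList_eq_self_of_nodup _ (PySem.Dict.nodup_keys_ofList next_map),
       show (PySem.Dict.ofList next_map).keys
          = (PySem.Dict.ofList next_map).items.map Prod.fst from rfl,
       List.filter_map, List.foldl_map]
    -- normalize B's pending loop to a filtered append
    rw [show (fun (p : List (Int × Int)) (nw : Int × Int) =>
          if inv.contains nw.1 then p else p ++ [nw])
        = (fun p nw => if !inv.contains nw.1 then p ++ [nw] else p) from by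
        funext p nw; by_cases h : inv.contains nw.1 = true <;> simp [h],
       PySem.List.foldl_append_if]
    simp only [List.map_id', List.nil_append]
    rw [hD01]
    -- the two filtered lists coincide
    have hpred : (PySem.Dict.ofList next_map).items.filter
          ((fun x => decide (x ∉ (PySem.Dict.ofList id_map).items.map Prod.snd)) ∘ Prod.fst)
        = (PySem.Dict.ofList next_map).items.filter (fun nw => !inv.contains nw.1) := by
      apply List.filter_congr
      intro nw _
      simp [Function.comp, hcont nw.1, decide_not]
    rw [hpred]
    -- on each kept entry, next_map[k] is exactly the stored value
    refine congrArg PySem.Dict.items (PySem.List.foldl_congr_mem' _ _ _ _ ?_)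
    intro nw hnw acc
    have hmem : nw ∈ (PySem.Dict.ofList next_map).items := (List.mem_filter.mp hnw).1
    have : (PySem.Dict.ofList next_map).getD nw.1 0 = nw.2 :=
      PySem.Dict.getD_of_mem_items _ hmem (PySem.Dict.nodup_keys_ofList next_map) 0
    rw [this]
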